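-- pv_equiv track=rewrite | github.com/serweryn617/AoC | 24/12/puzzle.py | calc_outline
-- ===== SOURCE A (Python) =====
-- DIRECTIONS = {(1, 0): 'L', (-1, 0): 'R', (0, 1): 'D', (0, -1): 'U'}
--
-- def calc_outline(region):
--     outline = {}
--
--     for tile in region:
--         x, y = tile
--         for (dx, dy), d in DIRECTIONS.items():
--             neighbour = x + dx, y + dy
--             if neighbour not in region:
--                 outline[(x * 2 + dx, y * 2 + dy)] = d
--
--     return outline
-- ===== SOURCE B (Python) =====
-- DIRECTIONS = {(1, 0): 'L', (-1, 0): 'R', (0, 1): 'D', (0, -1): 'U'}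
--
-- def calc_outline(region):
--     # Tally-and-cancel: every edge position is generated once per adjacent tile
--     # in the region, so interior edges get count 2 and boundary edges count 1.
--     tiles = list(dict.fromkeys(region))
--
--     counts = {}
--     for x, y in tiles:
--         for (dx, dy), d in DIRECTIONS.items():
--             pos = (x * 2 + dx, y * 2 + dy)
--             if pos in counts:
--                 n, d0 = counts[pos]
--                 counts[pos] = (n + 1, d0)
--             else:
--                 counts[pos] = (1, d)
--
--     return {pos: d for pos, (n, d) in counts.items() if n == 1}
-- ===== Notes on version B (the rewrite author's own statement) =====
-- stated objective: faster
-- what changed: Replaces A's per-neighbour membership scan of the region list by a single tally pass that counts, per edge position, how many adjacent tiles generate it (interior edges twice, boundary edges once) and then keeps the count-1 positions, with an O(n) dict-based dedup of the tiles.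
import Mathlib
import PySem

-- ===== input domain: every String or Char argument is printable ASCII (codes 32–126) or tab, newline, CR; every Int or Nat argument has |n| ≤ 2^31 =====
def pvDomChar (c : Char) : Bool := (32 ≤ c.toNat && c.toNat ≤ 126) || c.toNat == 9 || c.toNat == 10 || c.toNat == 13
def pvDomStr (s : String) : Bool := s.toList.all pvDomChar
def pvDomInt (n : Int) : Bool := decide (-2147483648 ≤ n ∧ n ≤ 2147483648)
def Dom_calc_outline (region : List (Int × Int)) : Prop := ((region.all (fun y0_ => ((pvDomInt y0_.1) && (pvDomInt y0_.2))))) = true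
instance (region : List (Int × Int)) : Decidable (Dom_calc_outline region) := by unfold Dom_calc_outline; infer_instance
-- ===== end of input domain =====

-- B replaces A's per-neighbour membership scan of `region` by a one-pass tally of edge
-- positions (interior edges are generated twice, boundary edges once) and a filter on
-- tally 1 — objective: faster (dict counting instead of A's repeated list scans).

-- ===== PORT A =====
def DIRECTIONS : List ((Int × Int) × String) :=
  [((1, 0), "L"), ((-1, 0), "R"), ((0, 1), "D"), ((0, -1), "U")]

def calc_outline (region : List (Int × Int)) : List (Int × Int × String) :=
  let outline : PySem.Dict (Int × Int) String :=
    region.foldl (fun outline tile =>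
      DIRECTIONS.foldl (fun outline p =>
        if (tile.1 + p.1.1, tile.2 + p.1.2) ∉ region then
          outline.insert (tile.1 * 2 + p.1.1, tile.2 * 2 + p.1.2) p.2
        else outline) outline) PySem.Dict.empty
  outline.items.map (fun e => (e.1.1, e.1.2, e.2))

-- ===== PORT B =====
def calc_outline_alt (region : List (Int × Int)) : List (Int × Int × String) :=
  let tiles := PySem.List.dedup region
  let counts : PySem.Dict (Int × Int) (Int × String) :=
    tiles.foldl (fun counts t =>
      DIRECTIONS.foldl (fun counts p =>
        counts.insert (t.1 * 2 + p.1.1, t.2 * 2 + p.1.2)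
          ((counts.getD (t.1 * 2 + p.1.1, t.2 * 2 + p.1.2) (0, p.2)).1 + 1,
           (counts.getD (t.1 * 2 + p.1.1, t.2 * 2 + p.1.2) (0, p.2)).2)) counts)
      PySem.Dict.empty
  -- dict comprehension over counts.items (distinct keys): the filtered items in order
  (counts.items.filter (fun e => e.2.1 == 1)).map (fun e => (e.1.1, e.1.2, e.2.2))

-- ===== PRECONDITION & SPEC =====
def Spec_calc_outline (region : List (Int × Int)) (out : List (Int × Int × String)) : Prop := out = calc_outline_alt region
instance (region : List (Int × Int)) (out : List (Int × Int × String)) : Decidable (Spec_calc_outline region out) := by unfold Spec_calc_outline; infer_instance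

-- ===== CLAIM (what is proved, stated in full; the proofs are below) =====
def Claim_equal_calc_outline : Prop := ∀ (region : List (Int × Int)), Dom_calc_outline region → Spec_calc_outline region (calc_outline region)

-- ===== LEMMAS AND PROOFS =====

-- One (tile, ((dx,dy), label)) work item of either loop.
abbrev PvQ : Type := (Int × Int) × ((Int × Int) × String)

def pvKey (q : PvQ) : Int × Int := (q.1.1 * 2 + q.2.1.1, q.1.2 * 2 + q.2.1.2)
def pvNb (q : PvQ) : Int × Int := (q.1.1 + q.2.1.1, q.1.2 + q.2.1.2)

def pvPairs (l : List (Int × Int)) : List PvQ :=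
  l.flatMap (fun t => DIRECTIONS.map (fun p => (t, p)))

def pvEntries (region l : List (Int × Int)) : List ((Int × Int) × String) :=
  ((pvPairs l).filter (fun q => !decide (pvNb q ∈ region))).map (fun q => (pvKey q, q.2.2))

def pvStepA (region : List (Int × Int)) (d : PySem.Dict (Int × Int) String) (q : PvQ) :
    PySem.Dict (Int × Int) String :=
  if pvNb q ∉ region then d.insert (pvKey q) q.2.2 else d

def pvStepB (d : PySem.Dict (Int × Int) (Int × String)) (q : PvQ) :
    PySem.Dict (Int × Int) (Int × String) :=
  d.insert (pvKey q) ((d.getD (pvKey q) (0, q.2.2)).1 + 1, (d.getD (pvKey q) (0, q.2.2)).2)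

-- number of work items generating position k, and the label of the first one
def pvCnt (L : List PvQ) (k : Int × Int) : Nat := (L.map pvKey).count k
def pvLbl (L : List PvQ) (k : Int × Int) : String :=
  match L.find? (fun q => pvKey q == k) with
  | some q => q.2.2
  | none => ""

lemma pv_mem_pairs {l : List (Int × Int)} {q : PvQ} :
    q ∈ pvPairs l ↔ q.1 ∈ l ∧ q.2 ∈ DIRECTIONS := by
  simp only [pvPairs, List.mem_flatMap, List.mem_map]
  constructor
  · rintro ⟨t, ht, p, hp, rfl⟩; exact ⟨ht, hp⟩
  · rintro ⟨h1, h2⟩; exact ⟨q.1, h1, q.2, h2, rfl⟩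

lemma pv_key_clash {q1 q2 : PvQ} (h1 : q1.2 ∈ DIRECTIONS) (h2 : q2.2 ∈ DIRECTIONS)
    (hk : pvKey q1 = pvKey q2) : q1 = q2 ∨ (q2.1 = pvNb q1 ∧ q1.1 = pvNb q2) := by
  obtain ⟨⟨x1, y1⟩, p1⟩ := q1
  obtain ⟨⟨x2, y2⟩, p2⟩ := q2
  simp only [DIRECTIONS, List.mem_cons, List.not_mem_nil, or_false] at h1 h2
  rcases h1 with rfl | rfl | rfl | rfl <;> rcases h2 with rfl | rfl | rfl | rfl <;>
    simp only [pvKey, pvNb, Prod.mk.injEq, and_true, true_and, String.reduceEq, and_false, false_or] at hk ⊢ <;>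
    omega

lemma pv_pairs_nodup {l : List (Int × Int)} (hl : l.Nodup) : (pvPairs l).Nodup := by
  induction l with
  | nil => simp [pvPairs]
  | cons t l ih =>
    rw [pvPairs, List.flatMap_cons]
    rcases List.nodup_cons.mp hl with ⟨htl, hl'⟩
    refine List.Nodup.append ?_ (ih hl') ?_
    · refine List.Nodup.map_on ?_ (by decide)
      intro x _ y _ hxy
      exact (Prod.mk.injEq _ _ _ _ ▸ hxy).2
    · intro q hq1 hq2
      rw [List.mem_map] at hq1
      obtain ⟨p, _, rfl⟩ := hq1
      exact htl ((pv_mem_pairs.mp hq2).1)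

-- A-side: flatten the nested loops
lemma pv_A_flat (region l : List (Int × Int)) :
    l.foldl (fun outline tile =>
      DIRECTIONS.foldl (fun outline p =>
        if (tile.1 + p.1.1, tile.2 + p.1.2) ∉ region then
          outline.insert (tile.1 * 2 + p.1.1, tile.2 * 2 + p.1.2) p.2
        else outline) outline) (d : PySem.Dict (Int × Int) String)
    = (pvPairs l).foldl (pvStepA region) d := by
  simp only [pvPairs, List.foldl_flatMap, List.foldl_map, pvStepA, pvKey, pvNb]

-- keys of the filtered pairs are pairwise distinct
lemma pv_entries_keys_nodup {region l : List (Int × Int)} (hl : l.Nodup)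
    (hsub : ∀ t ∈ l, t ∈ region) :
    (((pvPairs l).filter (fun q => !decide (pvNb q ∈ region))).map pvKey).Nodup := by
  refine List.Nodup.map_on ?_ ((pv_pairs_nodup hl).filter _)
  intro x hx y hy hxy
  rw [List.mem_filter] at hx hy
  obtain ⟨hx1, hx2⟩ := hx
  obtain ⟨hy1, hy2⟩ := hy
  rcases pv_key_clash (pv_mem_pairs.mp hx1).2 (pv_mem_pairs.mp hy1).2 hxy with h | ⟨h1, _⟩
  · exact h
  · exfalso
    simp only [Bool.not_eq_eq_eq_not, Bool.not_true, decide_eq_false_iff_not] at hx2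
    exact hx2 (h1 ▸ hsub _ (pv_mem_pairs.mp hy1).1)

-- A over a duplicate-free tile list: the dict is exactly the filtered work items
lemma pv_A_items {region l : List (Int × Int)} (hl : l.Nodup) (hsub : ∀ t ∈ l, t ∈ region) :
    ((pvPairs l).foldl (pvStepA region) PySem.Dict.empty).items = pvEntries region l := by
  have hstep : (pvStepA region)
      = fun (d : PySem.Dict (Int × Int) String) q =>
          if pvNb q ∉ region then d.insert (pvKey q) q.2.2 else d := rfl
  have hfilt := PySem.List.foldl_ite_eq_foldl_filter (fun q : PvQ => pvNb q ∉ region)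
    (fun (d : PySem.Dict (Int × Int) String) q => d.insert (pvKey q) q.2.2)
    (pvPairs l) PySem.Dict.empty
  beta_reduce at hfilt
  rw [hstep, hfilt]
  have hpred : (fun q => decide (pvNb q ∉ region)) = (fun q => !decide (pvNb q ∈ region)) := by
    funext q; simp
  rw [hpred, PySem.Dict.items_foldl_insert_fresh _ pvKey (fun q => q.2.2) _
    (fun a _ => by simp [PySem.Dict.contains_empty]) (pv_entries_keys_nodup hl hsub)]
  have he : (PySem.Dict.empty : PySem.Dict (Int × Int) String).items = [] := rfl
  rw [he, List.nil_append]
  rfl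

-- inserting an already-present binding changes nothing
lemma pv_insert_noop {d : PySem.Dict (Int × Int) String} {k : Int × Int} {v : String}
    (hmem : (k, v) ∈ d.items) (hnd : d.keys.Nodup) : d.insert k v = d := by
  apply PySem.Dict.ext
  rw [PySem.Dict.items_insert_of_contains _ v
    ((PySem.Dict.contains_iff_mem_keys d k).mpr (PySem.Dict.mem_keys_of_mem_items d hmem))]
  conv_rhs => rw [← List.map_id d.items]
  apply List.map_congr_left
  intro p hp
  by_cases hpk : p.1 = k
  · have h1 : d.get? k = some v := PySem.Dict.get?_of_mem_items d hmem hnd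
    have h2 : d.get? k = some p.2 := PySem.Dict.get?_of_mem_items d (by
      have hpp : p = (p.1, p.2) := rfl
      rw [hpp, hpk] at hp; exact hp) hnd
    have hv : v = p.2 := by rw [h1] at h2; exact (Option.some.injEq _ _).mp h2
    simp only [hpk, beq_self_eq_true, if_pos, id_eq]
    rw [hv, ← hpk]
  · simp [hpk]

-- a step for a work item of an already-processed duplicate-free tile list changes nothing
lemma pv_stepA_noop {region l : List (Int × Int)} (hl : l.Nodup) (hsub : ∀ t ∈ l, t ∈ region)
    {q : PvQ} (hq : q ∈ pvPairs l) :
    pvStepA region ((pvPairs l).foldl (pvStepA region) PySem.Dict.empty) q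
      = (pvPairs l).foldl (pvStepA region) PySem.Dict.empty := by
  have hitems : ((pvPairs l).foldl (pvStepA region) PySem.Dict.empty).items
      = pvEntries region l := pv_A_items hl hsub
  unfold pvStepA
  split
  case isTrue hc =>
    have hmem : (pvKey q, q.2.2) ∈ ((pvPairs l).foldl (pvStepA region) PySem.Dict.empty).items := by
      rw [hitems]
      unfold pvEntries
      exact List.mem_map.mpr ⟨q, List.mem_filter.mpr ⟨hq, by simpa using hc⟩, rfl⟩
    have hnd : ((pvPairs l).foldl (pvStepA region) PySem.Dict.empty).keys.Nodup := by
      have hk : ((pvPairs l).foldl (pvStepA region) PySem.Dict.empty).keys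
          = ((pvPairs l).filter (fun q => !decide (pvNb q ∈ region))).map pvKey := by
        simp only [PySem.Dict.keys, hitems, pvEntries, List.map_map]
        rfl
      rw [hk]; exact pv_entries_keys_nodup hl hsub
    exact pv_insert_noop hmem hnd
  case isFalse => rfl

lemma pv_block_noop {region l : List (Int × Int)} (hl : l.Nodup) (hsub : ∀ t ∈ l, t ∈ region)
    {t : Int × Int} (ht : t ∈ l) :
    (DIRECTIONS.map (fun p => (t, p))).foldl (pvStepA region)
      ((pvPairs l).foldl (pvStepA region) PySem.Dict.empty)
    = (pvPairs l).foldl (pvStepA region) PySem.Dict.empty := by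
  have hmem : ∀ p ∈ DIRECTIONS, (t, p) ∈ pvPairs l := fun p hp => pv_mem_pairs.mpr ⟨ht, hp⟩
  simp only [DIRECTIONS, List.map_cons, List.map_nil, List.foldl_cons, List.foldl_nil]
  rw [pv_stepA_noop hl hsub (hmem ((1, 0), "L") (by simp [DIRECTIONS])),
    pv_stepA_noop hl hsub (hmem ((-1, 0), "R") (by simp [DIRECTIONS])),
    pv_stepA_noop hl hsub (hmem ((0, 1), "D") (by simp [DIRECTIONS])),
    pv_stepA_noop hl hsub (hmem ((0, -1), "U") (by simp [DIRECTIONS]))]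

-- A is insensitive to duplicate tiles
lemma pv_A_dedup (region l : List (Int × Int)) (hsub : ∀ t ∈ l, t ∈ region) :
    (pvPairs l).foldl (pvStepA region) PySem.Dict.empty
    = (pvPairs (PySem.List.dedup l)).foldl (pvStepA region) PySem.Dict.empty := by
  induction l using List.reverseRecOn with
  | nil => rfl
  | append_singleton l t ih =>
    have hsub' : ∀ x ∈ l, x ∈ region := fun x hx => hsub x (List.mem_append_left _ hx)
    have hsplit : ∀ m : List (Int × Int),
        pvPairs (m ++ [t]) = pvPairs m ++ DIRECTIONS.map (fun p => (t, p)) := by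
      intro m; simp [pvPairs]
    rw [hsplit, List.foldl_append, ih hsub', PySem.List.dedup_eq_ofList,
      PySem.List.dedup_eq_ofList, PySem.Set.ofList_append_singleton, PySem.Set.add_eq_ite]
    by_cases htl : t ∈ l
    · rw [if_pos ((PySem.Set.mem_ofList _ _).mpr htl)]
      exact pv_block_noop (PySem.Set.nodup_ofList l)
        (fun x hx => hsub' x ((PySem.Set.mem_ofList _ _).mp hx))
        ((PySem.Set.mem_ofList _ _).mpr htl)
    · rw [if_neg (fun h => htl ((PySem.Set.mem_ofList _ _).mp h)), hsplit, List.foldl_append]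

-- B-side: lookup characterisation of the tally fold
lemma pv_B_get? (L : List PvQ) (d : PySem.Dict (Int × Int) (Int × String)) (k : Int × Int) :
    (L.foldl pvStepB d).get? k =
      match d.get? k with
      | some nd => some (nd.1 + (pvCnt L k : Int), nd.2)
      | none => if 0 < pvCnt L k then some ((pvCnt L k : Int), pvLbl L k) else none := by
  induction L generalizing d with
  | nil =>
    cases h : d.get? k <;> simp [pvCnt, h]
  | cons q L ih =>
    rw [List.foldl_cons, ih]
    by_cases hk : k = pvKey q
    · subst hk
      have hcnt : pvCnt (q :: L) (pvKey q) = pvCnt L (pvKey q) + 1 := by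
        simp [pvCnt]
      have hlbl : pvLbl (q :: L) (pvKey q) = q.2.2 := by
        simp [pvLbl, List.find?_cons_of_pos]
      cases hd : d.get? (pvKey q) with
      | some nd =>
        have hv : pvStepB d q = d.insert (pvKey q) (nd.1 + 1, nd.2) := by
          simp [pvStepB, PySem.Dict.getD, hd]
        rw [hv, PySem.Dict.get?_insert]
        simp only [hcnt, hd]
        push_cast
        ring_nf
      | none =>
        have hv : pvStepB d q = d.insert (pvKey q) (1, q.2.2) := by
          simp [pvStepB, PySem.Dict.getD, hd]
        rw [hv, PySem.Dict.get?_insert]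
        simp only [hcnt, hlbl]
        have hpos : 0 < pvCnt L (pvKey q) + 1 := Nat.succ_pos _
        simp only [hpos, if_pos]
        congr 1
        push_cast
        ring_nf
    · have hcnt : pvCnt (q :: L) k = pvCnt L k := by
        simp [pvCnt, Ne.symm hk]
      have hlbl : pvLbl (q :: L) k = pvLbl L k := by
        simp [pvLbl, List.find?_cons_of_neg, Ne.symm hk]
      have hget : (pvStepB d q).get? k = d.get? k := by
        simp [pvStepB, PySem.Dict.get?_insert, hk]
      rw [hget, hcnt, hlbl]

-- the tally of one position over all work items of a duplicate-free tile list
lemma pv_cnt_append (L1 L2 : List PvQ) (k : Int × Int) :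
    pvCnt (L1 ++ L2) k = pvCnt L1 k + pvCnt L2 k := by
  simp [pvCnt, List.count_append]

lemma pv_cnt_block (t' : Int × Int) (q : PvQ) (hd : q.2 ∈ DIRECTIONS) :
    pvCnt (DIRECTIONS.map (fun p => (t', p))) (pvKey q)
      = (if t' = q.1 then 1 else 0) + (if t' = pvNb q then 1 else 0) := by
  obtain ⟨⟨x, y⟩, p⟩ := q
  obtain ⟨a, b⟩ := t'
  simp only [DIRECTIONS, List.mem_cons, List.not_mem_nil, or_false] at hd
  rcases hd with rfl | rfl | rfl | rfl <;>
    · simp only [pvCnt, pvKey, pvNb, DIRECTIONS, List.map_cons, List.map_nil,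
        List.count_cons, List.count_nil, beq_iff_eq, Prod.mk.injEq]
      split_ifs <;> omega

lemma pv_cnt_total {q : PvQ} (hd : q.2 ∈ DIRECTIONS) (l : List (Int × Int)) :
    pvCnt (pvPairs l) (pvKey q) = l.count q.1 + l.count (pvNb q) := by
  induction l with
  | nil => simp [pvCnt, pvPairs]
  | cons t' l ih =>
    have hsplit : pvPairs (t' :: l) = DIRECTIONS.map (fun p => (t', p)) ++ pvPairs l := by
      simp [pvPairs]
    rw [hsplit, pv_cnt_append, pv_cnt_block t' q hd, ih,
      List.count_cons, List.count_cons]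
    obtain ⟨⟨x, y⟩, p⟩ := q
    obtain ⟨a, b⟩ := t'
    simp only [pvNb, beq_iff_eq, Prod.mk.injEq]
    split_ifs <;> omega

lemma pv_cnt_eq {l : List (Int × Int)} {q : PvQ} (hl : l.Nodup) (hq : q ∈ pvPairs l) :
    pvCnt (pvPairs l) (pvKey q) = if pvNb q ∈ l then 2 else 1 := by
  obtain ⟨ht, hd⟩ := pv_mem_pairs.mp hq
  rw [pv_cnt_total hd l, List.count_eq_one_of_mem hl ht]
  by_cases hnb : pvNb q ∈ l
  · rw [List.count_eq_one_of_mem hl hnb, if_pos hnb]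
  · rw [List.count_eq_zero.mpr hnb, if_neg hnb]

lemma pv_lbl_eq {l : List (Int × Int)} {q : PvQ} (hq : q ∈ pvPairs l)
    (hnb : pvNb q ∉ l) : pvLbl (pvPairs l) (pvKey q) = q.2.2 := by
  obtain ⟨ht, hd⟩ := pv_mem_pairs.mp hq
  have hex : (List.find? (fun x => pvKey x == pvKey q) (pvPairs l)).isSome :=
    List.find?_isSome.mpr ⟨q, hq, by simp⟩
  obtain ⟨q', hfind⟩ := Option.isSome_iff_exists.mp hex
  have hkey : pvKey q' = pvKey q := by simpa using List.find?_some hfind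
  have hq' := List.mem_of_find?_eq_some hfind
  rcases pv_key_clash (pv_mem_pairs.mp hq').2 hd hkey with rfl | ⟨_, h2⟩
  · simp [pvLbl, hfind]
  · exact absurd (h2 ▸ (pv_mem_pairs.mp hq').1) hnb

-- first-occurrence dedup keeps exactly the once-occurring elements where the tally is 1
lemma pv_ofList_filter_count_one {α : Type} [BEq α] [LawfulBEq α] (L : List α) (p : α → Bool)
    (hp : ∀ x, p x = true → L.count x ≤ 1) :
    (PySem.Set.ofList L).filter p = L.filter p := by
  induction L with
  | nil => rfl
  | cons x L ih =>
    have hp' : ∀ z, p z = true → L.count z ≤ 1 := by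
      intro z hz
      have := hp z hz
      rw [List.count_cons] at this
      omega
    rw [PySem.Set.ofList_cons]
    by_cases hx : p x = true
    · have hcnt := hp x hx
      rw [List.count_cons_self] at hcnt
      have hnot : x ∉ L := by
        rw [← List.count_eq_zero]; omega
      have hdis : (PySem.Set.ofList L).discard x = PySem.Set.ofList L := by
        unfold PySem.Set.discard
        apply List.filter_eq_self.mpr
        intro y hy
        have hyx : y ≠ x := fun h => hnot (h ▸ (PySem.Set.mem_ofList _ _).mp hy)
        simp [hyx]
      rw [hdis, List.filter_cons_of_pos hx, List.filter_cons_of_pos hx, ih hp']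
    · rw [List.filter_cons_of_neg hx]
      unfold PySem.Set.discard
      rw [List.filter_filter]
      have : ∀ y, (p y && !(y == x)) = p y := by
        intro y
        by_cases hyx : y = x
        · subst hyx; simp [Bool.eq_false_iff.mpr hx]
        · simp [hyx]
      rw [List.filter_congr (fun y _ => this y), ih hp', List.filter_cons_of_neg hx]

lemma pv_B_flat (l : List (Int × Int)) (d : PySem.Dict (Int × Int) (Int × String)) :
    l.foldl (fun counts t =>
      DIRECTIONS.foldl (fun counts p =>
        counts.insert (t.1 * 2 + p.1.1, t.2 * 2 + p.1.2)
          ((counts.getD (t.1 * 2 + p.1.1, t.2 * 2 + p.1.2) (0, p.2)).1 + 1,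
           (counts.getD (t.1 * 2 + p.1.1, t.2 * 2 + p.1.2) (0, p.2)).2)) counts) d
    = (pvPairs l).foldl pvStepB d := by
  simp only [pvPairs, List.foldl_flatMap, List.foldl_map, pvStepB, pvKey]

-- ===== VERDICT (by name: the statement is the Claim_ definition above) =====
theorem calc_outline_spec : Claim_equal_calc_outline := by
  unfold Claim_equal_calc_outline
  intro region _
  unfold Spec_calc_outline
  have hsubl : ∀ t ∈ PySem.List.dedup region, t ∈ region :=
    fun t ht => (PySem.List.mem_dedup _ _).mp ht
  have hndl : (PySem.List.dedup region).Nodup := PySem.List.nodup_dedup region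
  -- A reduces to the filtered work-item list
  have h0 : calc_outline region
      = ((pvPairs region).foldl (pvStepA region) PySem.Dict.empty).items.map
          (fun e => (e.1.1, e.1.2, e.2)) :=
    congrArg (fun d : PySem.Dict (Int × Int) String =>
      (PySem.Dict.items d).map (fun e : (Int × Int) × String => (e.1.1, e.1.2, e.2)))
      (pv_A_flat region region)
  have hA : calc_outline region
      = ((pvPairs (PySem.List.dedup region)).filter
          (fun q => !decide (pvNb q ∈ region))).map
          (fun q => ((pvKey q).1, (pvKey q).2, q.2.2)) := by
    rw [h0, pv_A_dedup region region (fun _ h => h), pv_A_items hndl hsubl]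
    unfold pvEntries
    rw [List.map_map]
    rfl
  -- B reduces to the same list
  have h1 : calc_outline_alt region
      = ((((pvPairs (PySem.List.dedup region)).foldl pvStepB PySem.Dict.empty).items.filter
          (fun e => e.2.1 == 1)).map (fun e => (e.1.1, e.1.2, e.2.2))) :=
    congrArg (fun d : PySem.Dict (Int × Int) (Int × String) =>
      ((PySem.Dict.items d).filter (fun e : (Int × Int) × (Int × String) => e.2.1 == 1)).map
        (fun e : (Int × Int) × (Int × String) => (e.1.1, e.1.2, e.2.2)))
      (pv_B_flat (PySem.List.dedup region) PySem.Dict.empty)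
  have hnd : ((pvPairs (PySem.List.dedup region)).foldl pvStepB PySem.Dict.empty).keys.Nodup :=
    PySem.Dict.nodup_keys_foldl_insert_key (pvPairs (PySem.List.dedup region))
      (fun q : PvQ => pvKey q)
      (fun d q => ((d.getD (pvKey q) (0, q.2.2)).1 + 1, (d.getD (pvKey q) (0, q.2.2)).2))
      PySem.Dict.empty PySem.Dict.nodup_keys_empty
  have hkeys : ((pvPairs (PySem.List.dedup region)).foldl pvStepB PySem.Dict.empty).keys
      = PySem.Set.ofList ((pvPairs (PySem.List.dedup region)).map pvKey) := by
    have h := PySem.Dict.keys_foldl_insert_key (pvPairs (PySem.List.dedup region))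
      (fun q : PvQ => pvKey q)
      (fun d q => ((d.getD (pvKey q) (0, q.2.2)).1 + 1, (d.getD (pvKey q) (0, q.2.2)).2))
      (PySem.Dict.empty : PySem.Dict (Int × Int) (Int × String))
    rw [PySem.Dict.keys_empty, PySem.Set.update_nil_left] at h
    exact h
  have hgetD : ∀ k ∈ PySem.Set.ofList ((pvPairs (PySem.List.dedup region)).map pvKey),
      ((fun k => (k, ((pvPairs (PySem.List.dedup region)).foldl pvStepB PySem.Dict.empty).getD k
          ((0 : Int), ""))) k)
        = ((fun k => (k, ((pvCnt (pvPairs (PySem.List.dedup region)) k : Int),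
            pvLbl (pvPairs (PySem.List.dedup region)) k))) k) := by
    intro k hk
    have hc : 0 < pvCnt (pvPairs (PySem.List.dedup region)) k := by
      have : k ∈ (pvPairs (PySem.List.dedup region)).map pvKey :=
        (PySem.Set.mem_ofList _ _).mp hk
      exact List.count_pos_iff.mpr this
    simp only [PySem.Dict.getD, pv_B_get?, PySem.Dict.get?_empty, hc, if_pos]
    rfl
  rw [hA, h1, PySem.Dict.items_eq_map_keys _ hnd ((0 : Int), ""), hkeys,
    List.map_congr_left hgetD, List.filter_map]
  have hcomp : ((fun e : (Int × Int) × (Int × String) => e.2.1 == 1) ∘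
      (fun k => (k, ((pvCnt (pvPairs (PySem.List.dedup region)) k : Int),
        pvLbl (pvPairs (PySem.List.dedup region)) k))))
      = fun k => ((pvCnt (pvPairs (PySem.List.dedup region)) k : Int) == 1) := rfl
  rw [hcomp, pv_ofList_filter_count_one _ _ (by
    intro x hx
    have : pvCnt (pvPairs (PySem.List.dedup region)) x = 1 := by
      have := beq_iff_eq.mp hx
      exact_mod_cast this
    unfold pvCnt at this
    omega)]
  rw [List.filter_map, List.map_map, List.map_map]
  have hfe : ∀ q ∈ pvPairs (PySem.List.dedup region),
      (((fun k => ((pvCnt (pvPairs (PySem.List.dedup region)) k : Int) == 1)) ∘ pvKey) q)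
        = (!decide (pvNb q ∈ region)) := by
    intro q hq
    simp only [Function.comp]
    rw [pv_cnt_eq hndl hq]
    by_cases hnb : pvNb q ∈ PySem.List.dedup region
    · rw [if_pos hnb]
      have : pvNb q ∈ region := (PySem.List.mem_dedup _ _).mp hnb
      simp [this]
    · rw [if_neg hnb]
      have : pvNb q ∉ region := fun h => hnb ((PySem.List.mem_dedup _ _).mpr h)
      simp [this]
  rw [List.filter_congr hfe]
  apply (List.map_congr_left ?_).symm
  intro q hq
  rw [List.mem_filter] at hq
  obtain ⟨hq1, hq2⟩ := hq
  have hnb : pvNb q ∉ PySem.List.dedup region := by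
    intro h
    have : pvNb q ∈ region := (PySem.List.mem_dedup _ _).mp h
    simp [this] at hq2
  simp only [Function.comp]
  rw [pv_lbl_eq hq1 hnb]
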